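-- pv_equiv track=rewrite | github.com/crap0101/laundry_basket | merge-sort+Injecretor.py | takes_f
-- ===== SOURCE A (Python) =====
-- from collections.abc import Sequence, Callable, Iterable
-- import itertools
--
-- def takes_f (seq: Sequence, n: int, fillvalue=None) -> Iterable:
--     """Yields chunk of `n` items a times from `seq`"""
--     it = iter(seq)
--     while True:
--         p = list(itertools.islice(it, 0, n))
--         if not p:
--             return
--         if len(p) < n:
--             p.extend([fillvalue]*(n-len(p)))
--         yield p
-- ===== SOURCE B (Python) =====
-- import itertools
--
-- def takes_f(seq, n, fillvalue=None):
--     if n < 0: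
--         raise ValueError("n must be non-negative")
--     return (list(chunk)
--             for chunk in itertools.zip_longest(*([iter(seq)] * n),
--                                                fillvalue=fillvalue))
-- ===== Notes on version B (the rewrite author's own statement) =====
-- stated objective: idiomatic
-- what changed: Replaced the manual while/islice/extend chunking loop with the standard-library zip_longest grouper (n copies of one shared iterator), which does both the chunking and the padding; negative n still raises ValueError as in A.
import Mathlib
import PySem

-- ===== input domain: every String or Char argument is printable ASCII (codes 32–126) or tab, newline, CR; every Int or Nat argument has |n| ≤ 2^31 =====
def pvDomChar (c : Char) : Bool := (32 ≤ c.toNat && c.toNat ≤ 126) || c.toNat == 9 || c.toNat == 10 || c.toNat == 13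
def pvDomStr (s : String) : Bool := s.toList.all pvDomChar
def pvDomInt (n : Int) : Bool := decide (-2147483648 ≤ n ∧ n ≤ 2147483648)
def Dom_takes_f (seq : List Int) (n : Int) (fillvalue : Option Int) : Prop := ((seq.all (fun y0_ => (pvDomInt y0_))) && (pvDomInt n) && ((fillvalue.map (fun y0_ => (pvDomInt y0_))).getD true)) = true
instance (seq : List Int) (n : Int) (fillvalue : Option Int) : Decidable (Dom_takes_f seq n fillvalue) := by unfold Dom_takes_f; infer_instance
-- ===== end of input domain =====

-- B replaces A's manual while/islice/extend loop with the standard zip_longest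
-- grouper (n copies of one shared iterator); like A, B raises ValueError for n < 0.

-- ===== PORT A =====
-- the while loop: p = list(islice(it, 0, n)); if not p: return; pad; yield p
def takesFLoop (fillvalue : Option Int) (k : Nat) (it : List Int) : List (List (Option Int)) :=
  let p := it.take k
  if hp : p = [] then []
  else
    (p.map some ++ List.replicate (k - p.length) fillvalue)
      :: takesFLoop fillvalue k (it.drop k)
termination_by it.length
decreasing_by
  have hp' : ¬ it.take k = [] := hp
  have h1 : it ≠ [] := by rintro rfl; simp at hp'
  have h2 : k ≠ 0 := by rintro rfl; simp at hp'
  rcases it with _ | ⟨x, rest⟩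
  · exact absurd rfl h1
  · rw [List.length_drop]
    simp only [List.length_cons]
    omega

def takes_f (seq : List Int) (n : Int) (fillvalue : Option Int) : List (List (Option Int)) :=
  -- n.toNat: exact for n ≥ 0 (Pre_); for n < 0 Python raises ValueError (excluded by Pre_)
  takesFLoop fillvalue n.toNat seq

-- ===== PORT B =====
-- one zip_longest row: each of the k copies of the shared iterator pulls the next
-- item in turn; an exhausted pull contributes fillvalue
def pullRow (fillvalue : Option Int) : Nat → List Int → List (Option Int) × List Int
  | 0, it => ([], it)
  | k + 1, [] => (fillvalue :: (pullRow fillvalue k []).1, [])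
  | k + 1, x :: rest =>
      let r := pullRow fillvalue k rest
      (some x :: r.1, r.2)

-- needed by zlRows's termination proof (cited by name there)
theorem pullRow_snd (fillvalue : Option Int) (k : Nat) (it : List Int) :
    (pullRow fillvalue k it).2 = it.drop k := by
  induction k generalizing it with
  | zero => simp [pullRow]
  | succ k ih =>
    cases it with
    | nil => simp [pullRow]
    | cons x rest => simp [pullRow, ih rest]

-- zip_longest stops when every iterator is exhausted; with k copies of ONE shared
-- iterator that is exactly when the stream is empty (or there are no iterators)
def zlRows (fillvalue : Option Int) (k : Nat) : List Int → List (List (Option Int))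
  | [] => []
  | x :: rest =>
      if k = 0 then []
      else
        let r := pullRow fillvalue k (x :: rest)
        r.1 :: zlRows fillvalue k r.2
termination_by it => it.length
decreasing_by
  rename_i hk
  have : (pullRow fillvalue k (x :: rest)).2 = (x :: rest).drop k := pullRow_snd fillvalue k (x :: rest)
  simp [this, List.length_drop]; omega

def takes_f_alt (seq : List Int) (n : Int) (fillvalue : Option Int) : List (List (Option Int)) :=
  -- B raises ValueError for n < 0 just like A (outside Pre_); n.toNat is exact on n ≥ 0
  zlRows fillvalue n.toNat seq

-- ===== PRECONDITION & SPEC =====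
-- Pre_ excludes n < 0, on which both Pythons raise ValueError
def Pre_takes_f (seq : List Int) (n : Int) (fillvalue : Option Int) : Prop := 0 ≤ n
instance (seq : List Int) (n : Int) (fillvalue : Option Int) : Decidable (Pre_takes_f seq n fillvalue) := by unfold Pre_takes_f; infer_instance

def pvWitness_takes_f : List Int × Int × Option Int := ([1, 2, 3, 4, 5], 2, some 0)

def Spec_takes_f (seq : List Int) (n : Int) (fillvalue : Option Int) (out : List (List (Option Int))) : Prop := out = takes_f_alt seq n fillvalue
instance (seq : List Int) (n : Int) (fillvalue : Option Int) (out : List (List (Option Int))) : Decidable (Spec_takes_f seq n fillvalue out) := by unfold Spec_takes_f; infer_instance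

-- ===== CLAIM (what is proved, stated in full; the proofs are below) =====
def Claim_equal_takes_f : Prop := ∀ (seq : List Int) (n : Int) (fillvalue : Option Int), Dom_takes_f seq n fillvalue → Pre_takes_f seq n fillvalue → Spec_takes_f seq n fillvalue (takes_f seq n fillvalue)

-- ===== LEMMAS AND PROOFS =====

theorem pullRow_fst (fillvalue : Option Int) (k : Nat) (it : List Int) :
    (pullRow fillvalue k it).1 = (it.take k).map some ++ List.replicate (k - it.length) fillvalue := by
  induction k generalizing it with
  | zero => simp [pullRow]
  | succ k ih =>
    cases it with
    | nil => simp [pullRow, ih, List.replicate_succ]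
    | cons x rest => simp [pullRow, ih rest]

theorem takesF_eq_zl_aux (fv : Option Int) (k : Nat) :
    ∀ (m : Nat) (it : List Int), it.length ≤ m → takesFLoop fv k it = zlRows fv k it := by
  intro m
  induction m with
  | zero =>
    intro it h
    have : it = [] := List.eq_nil_of_length_eq_zero (Nat.le_zero.mp h)
    subst this
    rw [takesFLoop]; simp [zlRows]
  | succ m ih =>
    intro it h
    cases it with
    | nil => rw [takesFLoop]; simp [zlRows]
    | cons x rest =>
      by_cases hk : k = 0
      · subst hk; rw [takesFLoop]; simp [zlRows]
      · rw [takesFLoop, zlRows]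
        have hp : ¬ (x :: rest).take k = [] := by
          cases k with
          | zero => exact absurd rfl hk
          | succ k => simp
        simp only [dif_neg hp, if_neg hk, pullRow_fst, pullRow_snd]
        have hcnt : k - ((x :: rest).take k).length = k - (x :: rest).length := by
          simp [List.length_take]; omega
        have hlen : ((x :: rest).drop k).length ≤ m := by
          have hk1 : 1 ≤ k := Nat.one_le_iff_ne_zero.mpr hk
          rw [List.length_drop]
          simp only [List.length_cons] at h ⊢
          omega
        rw [hcnt, ih _ hlen]

theorem takesF_eq_zl (fv : Option Int) (k : Nat) (it : List Int) :
    takesFLoop fv k it = zlRows fv k it :=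
  takesF_eq_zl_aux fv k it.length it (le_refl _)

-- ===== VERDICT (by name: the statement is the Claim_ definition above) =====
theorem takes_f_spec : Claim_equal_takes_f := by
  intro seq n fillvalue _ _
  unfold Spec_takes_f takes_f takes_f_alt
  exact takesF_eq_zl fillvalue n.toNat seq
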